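-- pv_equiv track=rewrite | github.com/Wikuska/python-learning | FASTA File Parser v2/other_operations.py | check_and_modify_long_segments
-- ===== SOURCE A (Python) =====
-- def check_and_modify_long_segments(outputs):
--     modified_outputs = []
--
--     for output in outputs:
--         line_length = 120
--         if len(output) > line_length:
--             lines = output.split("\n")
--             modified_lines = []
--
--             for line in lines:
--                 if len(line) > line_length:
--                     segments = line.split(" ")
--                     modified_segments = []
--
--                     for segment in segments:
--                         if len(segment) > line_length:
--                             modified_segment = " ".join(segment[i:i+line_length] for i in range(0, len(segment), line_length))
--                             modified_segments.append(modified_segment)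
--                         else:
--                             modified_segments.append(segment)
--
--                     modified_line = " ".join(modified_segments)
--                     modified_lines.append(modified_line)
--
--                 else:
--                     modified_lines.append(line)
--
--             modified_output = "\n".join(modified_lines)
--             modified_outputs.append(modified_output)
--
--         else:
--             modified_outputs.append(output)
--
--     return modified_outputs
-- ===== SOURCE B (Python) =====
-- def check_and_modify_long_segments(outputs):
--     # One pass per string: walk the characters once, buffering each maximal
--     # run of non-space/non-newline characters; flush runs longer than 120
--     # as space-joined 120-char chunks, everything else verbatim.
--     def flush(token):
--         if len(token) <= 120:
--             return token
--         parts = []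
--         while len(token) > 120:
--             parts.append(token[:120])
--             token = token[120:]
--         parts.append(token)
--         return " ".join(parts)
--
--     result = []
--     for output in outputs:
--         pieces = []
--         token = ""
--         for ch in output:
--             if ch == " " or ch == "\n":
--                 pieces.append(flush(token))
--                 pieces.append(ch)
--                 token = ""
--             else:
--                 token += ch
--         pieces.append(flush(token))
--         result.append("".join(pieces))
--     return result
-- ===== Notes on version B (the rewrite author's own statement) =====
-- stated objective: simpler
-- what changed: Replaced A's three nested passes (split on newline, split on space, range-based chunk slicing, each behind a redundant length guard) by a single left-to-right character scan that buffers each maximal space/newline-free token and flushes it, chunked into 120-char pieces only when longer than 120.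
import Mathlib
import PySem

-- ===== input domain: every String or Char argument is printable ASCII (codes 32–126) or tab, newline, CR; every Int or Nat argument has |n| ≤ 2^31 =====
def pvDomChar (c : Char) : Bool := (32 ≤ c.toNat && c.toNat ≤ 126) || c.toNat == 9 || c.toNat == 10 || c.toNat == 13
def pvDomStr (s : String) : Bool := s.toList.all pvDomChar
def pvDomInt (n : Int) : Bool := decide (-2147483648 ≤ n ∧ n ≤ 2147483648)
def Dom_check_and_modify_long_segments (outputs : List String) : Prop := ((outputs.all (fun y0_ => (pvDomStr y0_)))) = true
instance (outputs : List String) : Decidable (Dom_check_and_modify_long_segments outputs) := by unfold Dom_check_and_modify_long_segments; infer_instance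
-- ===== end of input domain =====

-- B replaces A's nested split("\n")/split(" ")/chunk passes (with redundant length guards)
-- by a single left-to-right scan over the characters that flushes each maximal
-- space/newline-free token, chunking it only when longer than 120. Objective: simpler.

-- ===== PORT A =====
-- " ".join(segment[i:i+120] for i in range(0, len(segment), 120))
def pvChunkJoinA (seg : List Char) : List Char :=
  PySem.Chars.join [' ']
    ((PySem.List.pyRange 0 (seg.length : Int) 120).map
      (fun i => PySem.Chars.slice seg (some i) (some (i + 120))))

-- the body of A's middle loop, for one line
def pvLineA (line : List Char) : List Char :=
  if 120 < line.length then
    PySem.Chars.join [' ']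
      ((PySem.Chars.splitOn line [' ']).map
        (fun seg => if 120 < seg.length then pvChunkJoinA seg else seg))
  else line

-- the body of A's outer loop, for one output
def pvOutA (s : List Char) : List Char :=
  if 120 < s.length then
    PySem.Chars.join ['\n'] ((PySem.Chars.splitOn s ['\n']).map pvLineA)
  else s

def check_and_modify_long_segments (outputs : List String) : List String :=
  outputs.map (fun o => String.ofList (pvOutA o.toList))

-- ===== PORT B =====
-- the while-loop of B's flush: peel 120 chars while the token is longer than 120
def pvChunksB (t : List Char) : List (List Char) :=
  if h : 120 < t.length then t.take 120 :: pvChunksB (t.drop 120) else [t]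
  termination_by t.length
  decreasing_by simp; omega

def pvFlushB (t : List Char) : List Char :=
  if t.length ≤ 120 then t else PySem.Chars.join [' '] (pvChunksB t)

-- B's character scan: tok is the pending token, pieces are emitted by concatenation
def pvScanB (tok : List Char) : List Char → List Char
  | [] => pvFlushB tok
  | c :: rest =>
    if c = ' ' ∨ c = '\n' then pvFlushB tok ++ c :: pvScanB [] rest
    else pvScanB (tok ++ [c]) rest

def check_and_modify_long_segments_alt (outputs : List String) : List String :=
  outputs.map (fun o => String.ofList (pvScanB [] o.toList))

-- ===== PRECONDITION & SPEC =====
def Spec_check_and_modify_long_segments (outputs : List String) (out : List String) : Prop := out = check_and_modify_long_segments_alt outputs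
instance (outputs : List String) (out : List String) : Decidable (Spec_check_and_modify_long_segments outputs out) := by unfold Spec_check_and_modify_long_segments; infer_instance

-- ===== CLAIM (what is proved, stated in full; the proofs are below) =====
def Claim_equal_check_and_modify_long_segments : Prop := ∀ (outputs : List String), Dom_check_and_modify_long_segments outputs → Spec_check_and_modify_long_segments outputs (check_and_modify_long_segments outputs)

-- ===== LEMMAS AND PROOFS =====

-- reference split on one character, structurally recursive
def pvSplitC (c : Char) : List Char → List (List Char)
  | [] => [[]]
  | a :: rest => if a = c then [] :: pvSplitC c rest else (pvSplitC c rest).modifyHead (a :: ·)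

lemma pvSplitC_ne_nil (c : Char) (s : List Char) : pvSplitC c s ≠ [] := by
  cases s with
  | nil => simp [pvSplitC]
  | cons a rest =>
    simp only [pvSplitC]
    split
    · simp
    · cases h : pvSplitC c rest with
      | nil => exact absurd h (pvSplitC_ne_nil c rest)
      | cons t ts => simp

lemma pvSplitC_len (c : Char) (s : List Char) : ∀ t ∈ pvSplitC c s, t.length ≤ s.length := by
  induction s with
  | nil => intro t ht; simp [pvSplitC] at ht; simp [ht]
  | cons a rest ih =>
    intro t ht
    simp only [pvSplitC] at ht
    split at ht
    · simp only [List.mem_cons] at ht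
      rcases ht with rfl | ht
      · simp
      · exact le_trans (ih t ht) (by simp)
    · cases h : pvSplitC c rest with
      | nil => exact absurd h (pvSplitC_ne_nil c rest)
      | cons u us =>
        rw [h] at ht
        simp only [List.modifyHead, List.mem_cons] at ht
        rcases ht with rfl | ht
        · have := ih u (by rw [h]; exact List.mem_cons_self)
          simpa using this
        · exact le_trans (ih t (by rw [h]; exact List.mem_cons_of_mem _ ht)) (by simp)

lemma pvIntercalate_splitC (c : Char) (s : List Char) :
    List.intercalate [c] (pvSplitC c s) = s := by
  induction s with
  | nil => simp [pvSplitC, List.intercalate]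
  | cons a rest ih =>
    simp only [pvSplitC]
    split
    · rename_i hac
      cases h : pvSplitC c rest with
      | nil => exact absurd h (pvSplitC_ne_nil c rest)
      | cons t ts =>
        rw [h] at ih
        subst hac
        simp [List.intercalate] at ih ⊢
        simpa using ih
    · cases h : pvSplitC c rest with
      | nil => exact absurd h (pvSplitC_ne_nil c rest)
      | cons t ts =>
        rw [h] at ih
        simp only [List.modifyHead]
        cases ts with
        | nil => simp_all [List.intercalate]
        | cons u us =>
          simp [List.intercalate] at ih ⊢
          simpa using ih

-- PySem's splitOn on a one-character separator is pvSplitC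
lemma pvGo_eq (c : Char) (l : List Char) : ∀ (fuel : Nat), l.length ≤ fuel →
    ∀ (cur : List Char) (acc : List (List Char)),
    PySem.Chars.splitOn.go [c] fuel l cur acc
      = acc.reverse ++ (pvSplitC c l).modifyHead (cur.reverse ++ ·) := by
  induction l with
  | nil =>
    intro fuel _ cur acc
    cases fuel <;> simp [PySem.Chars.splitOn.go, pvSplitC]
  | cons a rest ih =>
    intro fuel hf cur acc
    cases fuel with
    | zero => simp at hf
    | succ f =>
      rw [PySem.Chars.splitOn.go]
      by_cases hac : a = c
      · subst hac
        have hpre : [a].isPrefixOf (a :: rest) = true := by simp [List.isPrefixOf]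
        rw [if_pos hpre]
        simp only [List.length_cons] at hf
        rw [show List.drop [a].length (a :: rest) = rest by simp]
        rw [ih f (by omega) [] (cur.reverse :: acc)]
        cases h : pvSplitC a rest with
        | nil => exact absurd h (pvSplitC_ne_nil a rest)
        | cons t ts => simp [pvSplitC, h]
      · have hpre : [c].isPrefixOf (a :: rest) = false := by
          simp [List.isPrefixOf]
          exact fun h => absurd h.symm hac
        rw [if_neg (by simp [hpre])]
        simp only [List.length_cons] at hf
        rw [ih f (by omega) (a :: cur) acc]
        cases h : pvSplitC c rest with
        | nil => exact absurd h (pvSplitC_ne_nil c rest)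
        | cons t ts => simp [pvSplitC, if_neg hac, h]

lemma pvSplitOn_eq (c : Char) (s : List Char) :
    PySem.Chars.splitOn s [c] = pvSplitC c s := by
  unfold PySem.Chars.splitOn
  rw [pvGo_eq c s (s.length + 1) (by omega) [] []]
  cases h : pvSplitC c s with
  | nil => exact absurd h (pvSplitC_ne_nil c s)
  | cons t ts => simp

-- intercalate facts used to peel heads
lemma pvIntercalate_cons_cons (sep x y : List Char) (zs : List (List Char)) :
    List.intercalate sep (x :: y :: zs) = x ++ sep ++ List.intercalate sep (y :: zs) := by
  simp [List.intercalate]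

lemma pvIntercalate_singleton (sep x : List Char) : List.intercalate sep [x] = x := by
  simp [List.intercalate]

lemma pvIntercalate_append_head (sep x y : List Char) (zs : List (List Char)) :
    List.intercalate sep ((x ++ y) :: zs) = x ++ List.intercalate sep (y :: zs) := by
  cases zs with
  | nil => simp [pvIntercalate_singleton]
  | cons z zs' => simp [pvIntercalate_cons_cons, List.append_assoc]

-- ---- chunking: A's range/slice join equals B's take/drop chunks ----
def pvMapSlices (seg : List Char) : List (List Char) :=
  (PySem.List.pyRange 0 (seg.length : Int) 120).map
    (fun i => PySem.List.slice seg (some i) (some (i + 120)))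

lemma pvMapSlices_short (seg : List Char) (h1 : seg ≠ []) (h2 : seg.length ≤ 120) :
    pvMapSlices seg = [seg] := by
  unfold pvMapSlices
  have hlen : 0 < seg.length := List.length_pos_iff.mpr h1
  rw [PySem.List.pyRange_of_pos 0 (seg.length : Int) (by norm_num)]
  rw [if_pos (by exact_mod_cast hlen)]
  have : ((seg.length : Int) - 0 + 120 - 1) / 120 = 1 := by omega
  rw [this]
  simp only [Int.toNat_one, List.range_one, List.map_cons, List.map_nil]
  rw [show ((0:Int) + 120 * ((0:Nat):Int)) = (((0:Nat)):Int) by norm_num,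
      show (((0:Nat):Int) + 120) = ((120:Nat):Int) by norm_num,
      PySem.List.slice_natCast]
  simp [List.take_of_length_le h2]

lemma pvMapSlices_long (seg : List Char) (h : 120 < seg.length) :
    pvMapSlices seg = seg.take 120 :: pvMapSlices (seg.drop 120) := by
  unfold pvMapSlices
  rw [PySem.List.pyRange_of_pos 0 (seg.length : Int) (by norm_num),
      PySem.List.pyRange_of_pos 0 ((seg.drop 120).length : Int) (by norm_num)]
  rw [if_pos (by exact_mod_cast lt_trans (by norm_num) h),
      if_pos (by simp; omega)]
  have hN : (((seg.length : Int) - 0 + 120 - 1) / 120).toNat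
      = ((((seg.drop 120).length : Int) - 0 + 120 - 1) / 120).toNat + 1 := by
    simp only [List.length_drop]
    omega
  rw [hN, List.range_succ_eq_map]
  simp only [List.map_cons, List.map_map]
  refine congrArg₂ List.cons ?_ ?_
  · rw [show (0:Int) + 120 * ((0:Nat):Int) = ((0:Nat):Int) by norm_num,
      show ((0:Nat):Int) + 120 = ((120:Nat):Int) by norm_num,
      PySem.List.slice_natCast]
    simp
  · apply List.map_congr_left
    intro k _
    simp only [Function.comp_apply]
    rw [show (0:Int) + 120 * ((Nat.succ k : Nat):Int) = ((120*(k+1) : Nat):Int) by push_cast; ring]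
    rw [show ((120*(k+1) : Nat):Int) + 120 = ((120*(k+1)+120 : Nat):Int) by push_cast; ring]
    rw [show (0:Int) + 120 * ((k : Nat):Int) = ((120*k : Nat):Int) by push_cast; ring]
    rw [show ((120*k : Nat):Int) + 120 = ((120*k+120 : Nat):Int) by push_cast; ring]
    rw [PySem.List.slice_natCast, PySem.List.slice_natCast]
    have e1 : 120*(k+1)+120 - 120*(k+1) = 120 := by omega
    have e2 : 120*k+120 - 120*k = 120 := by omega
    rw [e1, e2, List.drop_drop]
    rw [show 120 + 120*k = 120*(k+1) from by omega]

lemma pvChunks_eq (seg : List Char) (h1 : seg ≠ []) :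
    pvMapSlices seg = pvChunksB seg := by
  induction seg using pvChunksB.induct with
  | case1 t h ih =>
    rw [pvChunksB, dif_pos h, pvMapSlices_long t h, ih (by
      intro hnil
      have := congrArg List.length hnil
      simp at this
      omega)]
  | case2 t h =>
    rw [pvChunksB, dif_neg h, pvMapSlices_short t h1 (by omega)]

lemma pvFlush_eq (seg : List Char) :
    (if 120 < seg.length then pvChunkJoinA seg else seg) = pvFlushB seg := by
  by_cases h : 120 < seg.length
  · rw [if_pos h]
    unfold pvFlushB
    rw [if_neg (by omega)]
    unfold pvChunkJoinA
    have : seg ≠ [] := by intro hnil; subst hnil; simp at h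
    rw [show ((PySem.List.pyRange 0 (seg.length : Int) 120).map
        (fun i => PySem.Chars.slice seg (some i) (some (i + 120)))) = pvMapSlices seg by
      simp [pvMapSlices]]
    rw [pvChunks_eq seg this]
  · rw [if_neg h]
    unfold pvFlushB
    rw [if_pos (by omega)]

-- ---- the canonical two-level form of the scan ----
def pvProcLine (tok line : List Char) : List Char :=
  List.intercalate [' '] (((pvSplitC ' ' line).modifyHead (tok ++ ·)).map pvFlushB)

def pvProcAll (tok s : List Char) : List Char :=
  match pvSplitC '\n' s with
  | [] => []
  | l :: ls => List.intercalate ['\n'] (pvProcLine tok l :: ls.map (pvProcLine []))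

lemma pvModifyHead_nil_append (l : List (List Char)) :
    l.modifyHead (fun t => [] ++ t) = l := by cases l <;> simp

lemma pvProcAll_nil_eq (s : List Char) :
    pvProcAll [] s = List.intercalate ['\n'] ((pvSplitC '\n' s).map (pvProcLine [])) := by
  unfold pvProcAll
  cases h : pvSplitC '\n' s with
  | nil => exact absurd h (pvSplitC_ne_nil '\n' s)
  | cons l ls => simp

lemma pvScan_eq_procAll (s : List Char) : ∀ tok, pvScanB tok s = pvProcAll tok s := by
  induction s with
  | nil =>
    intro tok
    simp [pvScanB, pvProcAll, pvSplitC, pvProcLine, pvIntercalate_singleton]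
  | cons c rest ih =>
    intro tok
    by_cases hd : c = ' ' ∨ c = '\n'
    · rw [pvScanB, if_pos hd, ih []]
      rcases hd with rfl | rfl
      · -- space
        unfold pvProcAll
        rw [show pvSplitC '\n' (' ' :: rest) = (pvSplitC '\n' rest).modifyHead (' ' :: ·) by
          simp [pvSplitC]]
        cases h : pvSplitC '\n' rest with
        | nil => exact absurd h (pvSplitC_ne_nil '\n' rest)
        | cons l ls =>
          simp only [List.modifyHead]
          rw [show pvProcLine tok (' ' :: l)
              = pvFlushB tok ++ ' ' :: pvProcLine [] l by
            unfold pvProcLine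
            rw [show pvSplitC ' ' (' ' :: l) = [] :: pvSplitC ' ' l by simp [pvSplitC]]
            simp only [List.modifyHead, List.append_nil, List.map_cons]
            cases h2 : pvSplitC ' ' l with
            | nil => exact absurd h2 (pvSplitC_ne_nil ' ' l)
            | cons t ts =>
              simp [pvIntercalate_cons_cons]]
          rw [show (pvFlushB tok ++ ' ' :: pvProcLine [] l)
              = (pvFlushB tok ++ [' ']) ++ pvProcLine [] l by simp]
          rw [pvIntercalate_append_head]
          simp
      · -- newline
        unfold pvProcAll
        rw [show pvSplitC '\n' ('\n' :: rest) = [] :: pvSplitC '\n' rest by simp [pvSplitC]]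
        cases h : pvSplitC '\n' rest with
        | nil => exact absurd h (pvSplitC_ne_nil '\n' rest)
        | cons l ls =>
          dsimp only
          rw [show pvProcLine tok [] = pvFlushB tok by
            simp [pvProcLine, pvSplitC, pvIntercalate_singleton]]
          rw [List.map_cons, pvIntercalate_cons_cons]
          simp
    · push_neg at hd
      rw [pvScanB, if_neg (by simpa using hd), ih (tok ++ [c])]
      unfold pvProcAll
      rw [show pvSplitC '\n' (c :: rest) = (pvSplitC '\n' rest).modifyHead (c :: ·) by
        simp [pvSplitC, hd.2]]
      cases h : pvSplitC '\n' rest with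
      | nil => exact absurd h (pvSplitC_ne_nil '\n' rest)
      | cons l ls =>
        simp only [List.modifyHead]
        congr 1
        unfold pvProcLine
        rw [show pvSplitC ' ' (c :: l) = (pvSplitC ' ' l).modifyHead (c :: ·) by
          simp [pvSplitC, hd.1]]
        cases h2 : pvSplitC ' ' l with
        | nil => exact absurd h2 (pvSplitC_ne_nil ' ' l)
        | cons t ts => simp [List.modifyHead]

-- A's per-line body in canonical form
lemma pvProcLine_short (line : List Char) (h : line.length ≤ 120) :
    pvProcLine [] line = line := by
  unfold pvProcLine
  rw [pvModifyHead_nil_append]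
  rw [show (pvSplitC ' ' line).map pvFlushB = pvSplitC ' ' line by
    conv_rhs => rw [show pvSplitC ' ' line = (pvSplitC ' ' line).map id from (List.map_id _).symm]
    apply List.map_congr_left
    intro t ht
    show pvFlushB t = t
    unfold pvFlushB
    rw [if_pos (le_trans (pvSplitC_len ' ' line t ht) h)]]
  exact pvIntercalate_splitC ' ' line

lemma pvLineA_eq (line : List Char) : pvLineA line = pvProcLine [] line := by
  by_cases h : 120 < line.length
  · unfold pvLineA
    rw [if_pos h]
    unfold pvProcLine
    rw [pvModifyHead_nil_append, pvSplitOn_eq]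
    show List.intercalate [' '] _ = _
    congr 1
    apply List.map_congr_left
    intro t _
    exact pvFlush_eq t
  · rw [pvProcLine_short line (by omega)]
    unfold pvLineA
    rw [if_neg h]

lemma pvOutA_eq (s : List Char) : pvOutA s = pvProcAll [] s := by
  rw [pvProcAll_nil_eq]
  by_cases h : 120 < s.length
  · unfold pvOutA
    rw [if_pos h, pvSplitOn_eq]
    show List.intercalate ['\n'] _ = _
    congr 1
    apply List.map_congr_left
    intro l _
    exact pvLineA_eq l
  · unfold pvOutA
    rw [if_neg h]
    rw [show (pvSplitC '\n' s).map (pvProcLine []) = pvSplitC '\n' s by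
      conv_rhs => rw [show pvSplitC '\n' s = (pvSplitC '\n' s).map id from (List.map_id _).symm]
      apply List.map_congr_left
      intro l hl
      show pvProcLine [] l = l
      exact pvProcLine_short l (le_trans (pvSplitC_len '\n' s l hl) (by omega))]
    exact (pvIntercalate_splitC '\n' s).symm

lemma pvPerOutput (s : List Char) : pvOutA s = pvScanB [] s := by
  rw [pvOutA_eq, pvScan_eq_procAll]

-- ===== VERDICT (by name: the statement is the Claim_ definition above) =====
theorem check_and_modify_long_segments_spec : Claim_equal_check_and_modify_long_segments := by
  intro outputs _
  unfold Spec_check_and_modify_long_segments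
  unfold check_and_modify_long_segments check_and_modify_long_segments_alt
  apply List.map_congr_left
  intro o _
  rw [pvPerOutput]
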